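-- pv_equiv track=rewrite | github.com/thegofwl/Flash_Card_New | words/views.py | get_show_word_list
-- ===== SOURCE A (Python) =====
-- def get_show_word_list(is_success: bool, input_word_list, bold_num):
--     show_word_list = ''
--     if is_success:
--         for index, word in enumerate(input_word_list):
--             if index == bold_num:
--                 show_word_list += f'<b>[{word}]</b>'
--                 if index < len(input_word_list) - 1:
--                     show_word_list += ", "
--             elif index < len(input_word_list) - 1:
--                 show_word_list += f'{word}, '
--             else:
--                 show_word_list += f'{word}'
--     else:
--         show_word_list = '검색 실패'
--     return show_word_list
-- ===== SOURCE B (Python) =====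
-- def get_show_word_list(is_success: bool, input_word_list, bold_num):
--     if not is_success:
--         return '검색 실패'
--     if not (0 <= bold_num < len(input_word_list)):
--         return ', '.join(input_word_list)
--     pieces = (input_word_list[:bold_num]
--               + [f'<b>[{input_word_list[bold_num]}]</b>']
--               + input_word_list[bold_num + 1:])
--     return ', '.join(pieces)
-- ===== Notes on version B (the rewrite author's own statement) =====
-- stated objective: simpler
-- what changed: Instead of a per-element loop with index==bold_num and separator branches, B splices the list by slicing: words before bold_num, the single bolded word, words after, then one join with ', '; when bold_num is out of range it is a plain join of the list.
import Mathlib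
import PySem

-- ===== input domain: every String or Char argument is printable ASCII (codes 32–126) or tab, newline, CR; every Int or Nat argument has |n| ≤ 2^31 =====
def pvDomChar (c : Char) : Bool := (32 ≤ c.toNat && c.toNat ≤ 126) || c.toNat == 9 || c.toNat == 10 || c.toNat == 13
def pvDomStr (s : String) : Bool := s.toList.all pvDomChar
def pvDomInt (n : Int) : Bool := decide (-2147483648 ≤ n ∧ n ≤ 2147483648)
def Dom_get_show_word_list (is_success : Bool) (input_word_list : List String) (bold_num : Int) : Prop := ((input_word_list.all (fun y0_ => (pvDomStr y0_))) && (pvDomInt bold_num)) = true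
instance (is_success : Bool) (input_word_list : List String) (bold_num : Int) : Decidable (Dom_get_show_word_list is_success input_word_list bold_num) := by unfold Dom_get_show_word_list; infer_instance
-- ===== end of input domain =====

-- B replaces A's per-element loop with index/separator branches by a slice splice:
-- the words before bold_num, the one bolded word, the words after, joined once with ", "
-- (objective: simpler).

-- ===== PORT A =====
def get_show_word_list (is_success : Bool) (input_word_list : List String) (bold_num : Int) : String :=
  if is_success then
    (PySem.List.enumerate input_word_list).foldl
      (fun show_word_list p =>
        if p.1 == bold_num then
          let s1 := show_word_list ++ "<b>[" ++ p.2 ++ "]</b>"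
          if p.1 < (input_word_list.length : Int) - 1 then s1 ++ ", " else s1
        else if p.1 < (input_word_list.length : Int) - 1 then
          show_word_list ++ p.2 ++ ", "
        else
          show_word_list ++ p.2) ""
  else "검색 실패"

-- ===== PORT B =====
def get_show_word_list_alt (is_success : Bool) (input_word_list : List String) (bold_num : Int) : String :=
  if !is_success then "검색 실패"
  else if ¬ (0 ≤ bold_num ∧ bold_num < (input_word_list.length : Int)) then
    PySem.Str.join ", " input_word_list
  else
    let pieces :=
      PySem.List.slice input_word_list none (some bold_num)
        ++ ["<b>[" ++ (PySem.List.pyGet? input_word_list bold_num).getD "" ++ "]</b>"]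
        ++ PySem.List.slice input_word_list (some (bold_num + 1)) none
    PySem.Str.join ", " pieces

-- ===== PRECONDITION & SPEC =====
def Spec_get_show_word_list (is_success : Bool) (input_word_list : List String) (bold_num : Int) (out : String) : Prop := out = get_show_word_list_alt is_success input_word_list bold_num
instance (is_success : Bool) (input_word_list : List String) (bold_num : Int) (out : String) : Decidable (Spec_get_show_word_list is_success input_word_list bold_num out) := by unfold Spec_get_show_word_list; infer_instance

-- ===== CLAIM (what is proved, stated in full; the proofs are below) =====
def Claim_equal_get_show_word_list : Prop := ∀ (is_success : Bool) (input_word_list : List String) (bold_num : Int), Dom_get_show_word_list is_success input_word_list bold_num → Spec_get_show_word_list is_success input_word_list bold_num (get_show_word_list is_success input_word_list bold_num)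

-- ===== LEMMAS AND PROOFS =====

theorem strJoin_nil (sep : String) : PySem.Str.join sep [] = "" := by
  simp [PySem.Str.join, PySem.Chars.join, List.intercalate]

theorem strJoin_singleton (sep p : String) : PySem.Str.join sep [p] = p := by
  apply String.toList_injective
  simp [PySem.Str.toList_join, PySem.Chars.join_singleton]

theorem strJoin_cons_cons (sep p q : String) (rest : List String) :
    PySem.Str.join sep (p :: q :: rest) = p ++ sep ++ PySem.Str.join sep (q :: rest) := by
  apply String.toList_injective
  simp [PySem.Str.toList_join, PySem.Chars.join_cons_cons]

-- A's loop over a suffix of enumerate appends the joined formatted parts to the accumulator.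
theorem loop_eq_join (n bold : Int) :
    ∀ (l : List String) (s : Int) (acc : String), s + l.length = n →
      (PySem.List.enumerate l s).foldl
        (fun show_word_list p =>
          if p.1 == bold then
            let s1 := show_word_list ++ "<b>[" ++ p.2 ++ "]</b>"
            if p.1 < n - 1 then s1 ++ ", " else s1
          else if p.1 < n - 1 then
            show_word_list ++ p.2 ++ ", "
          else
            show_word_list ++ p.2) acc
      = acc ++ PySem.Str.join ", "
          ((PySem.List.enumerate l s).map
            (fun p => if p.1 == bold then "<b>[" ++ p.2 ++ "]</b>" else p.2)) := by
  intro l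
  induction l with
  | nil => intro s acc _; simp [PySem.List.enumerate, strJoin_nil]
  | cons x t ih =>
    intro s acc hn
    rw [PySem.List.enumerate_cons]
    cases t with
    | nil =>
      have hs : ¬ (s < n - 1) := by simp at hn; omega
      simp only [PySem.List.enumerate, List.foldl_cons, List.foldl_nil, List.map_cons,
        List.map_nil, strJoin_singleton]
      by_cases hb : s == bold <;>
        simp [hb, hs, String.append_assoc]
    | cons y tt =>
      have hs : s < n - 1 := by simp at hn; omega
      have hn' : (s + 1) + (y :: tt).length = n := by simp at hn ⊢; omega
      rw [List.foldl_cons]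
      have hform : (PySem.List.enumerate (y :: tt) (s + 1)).map
          (fun p => if p.1 == bold then "<b>[" ++ p.2 ++ "]</b>" else p.2)
          = (if (s + 1 : Int) == bold then "<b>[" ++ y ++ "]</b>" else y) ::
            (PySem.List.enumerate tt (s + 1 + 1)).map
              (fun p => if p.1 == bold then "<b>[" ++ p.2 ++ "]</b>" else p.2) := by
        rw [PySem.List.enumerate_cons, List.map_cons]
      conv_rhs => rw [List.map_cons, hform, strJoin_cons_cons, ← hform]
      rw [ih (s + 1) _ hn']
      by_cases hb : s == bold <;>
        simp [hb, hs, String.append_assoc]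

-- When no index in the enumeration equals bold, the formatting map is the identity.
theorem map_fmt_out (bold : Int) :
    ∀ (l : List String) (s : Int), (bold < s ∨ (s + l.length : Int) ≤ bold) →
      (PySem.List.enumerate l s).map
        (fun p => if p.1 == bold then "<b>[" ++ p.2 ++ "]</b>" else p.2) = l := by
  intro l
  induction l with
  | nil => intro s _; simp [PySem.List.enumerate]
  | cons x t ih =>
    intro s h
    have hb : ¬ (s == bold) := by simp at h ⊢; omega
    rw [PySem.List.enumerate_cons, List.map_cons]
    simp only [hb, Bool.false_eq_true, ite_false]
    rw [ih (s + 1) (by simp at h ⊢; omega)]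

-- When bold = s + k with k inside the list, the map is take/bolded-element/drop.
theorem map_fmt_in (bold : Int) :
    ∀ (l : List String) (s : Int) (k : Nat), k < l.length → bold = s + k →
      (PySem.List.enumerate l s).map
        (fun p => if p.1 == bold then "<b>[" ++ p.2 ++ "]</b>" else p.2)
      = l.take k ++ ["<b>[" ++ l.getD k "" ++ "]</b>"] ++ l.drop (k + 1) := by
  intro l
  induction l with
  | nil => intro s k hk _; simp at hk
  | cons x t ih =>
    intro s k hk hb
    rw [PySem.List.enumerate_cons, List.map_cons]
    cases k with
    | zero =>
      have hs : (s == bold) = true := by simp; omega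
      rw [map_fmt_out bold t (s + 1) (by left; omega)]
      simp [hs]
    | succ m =>
      have hs : ¬ (s == bold) := by simp; omega
      have hm : m < t.length := by simpa using hk
      simp only [hs, Bool.false_eq_true, ite_false]
      rw [ih (s + 1) m hm (by omega)]
      simp

-- ===== VERDICT (by name: the statement is the Claim_ definition above) =====
theorem get_show_word_list_spec : Claim_equal_get_show_word_list := by
  intro is_success input_word_list bold_num _
  unfold Spec_get_show_word_list get_show_word_list get_show_word_list_alt
  cases is_success with
  | false => simp
  | true =>
    simp only [if_true, Bool.not_true, Bool.false_eq_true, ite_false]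
    rw [loop_eq_join (input_word_list.length : Int) bold_num input_word_list 0 "" (by simp)]
    by_cases hin : 0 ≤ bold_num ∧ bold_num < (input_word_list.length : Int)
    · rw [if_neg (by simpa using hin)]
      obtain ⟨h0, h1⟩ := hin
      obtain ⟨k, rfl⟩ : ∃ k : Nat, bold_num = (k : Int) :=
        ⟨bold_num.toNat, (Int.toNat_of_nonneg h0).symm⟩
      have hk : k < input_word_list.length := by exact_mod_cast h1
      rw [map_fmt_in (k : Int) input_word_list 0 k hk (by omega)]
      rw [PySem.List.slice_to _ (by positivity), PySem.List.slice_from _ (by positivity)]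
      simp [Int.toNat_natCast, String.empty_append]
    · rw [if_pos (by simpa using hin)]
      rw [map_fmt_out bold_num input_word_list 0 (by omega)]
      simp [String.empty_append]
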